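-- pv_equiv track=rewrite | github.com/SAV-Open-Playground/sav-agent | sav_agent.py | aggregate_asn_path
-- ===== SOURCE A (Python) =====
-- def add_path(given_asn_path, data_dict):
--     for path in data_dict:
--         given_len = len(given_asn_path)
--         saved_len = len(path)
--         if given_len <= saved_len:
--             if given_asn_path == path[:given_len]:
--                 return
--     data_dict.append(given_asn_path)
--
-- def aggregate_asn_path(list_of_asn_path):
--     temp = []
--     for path in list_of_asn_path:
--         temp.append(path[list(path.keys())[0]])
--
--     temp = sorted(temp, key=lambda x: len(x), reverse=True)
--     result = {}
--     for route in temp: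
--         if route[0] not in result:
--             result[route[0]] = [route]
--         else:
--             add_path(route, result[route[0]])
--     return result
-- ===== SOURCE B (Python) =====
-- def aggregate_asn_path(list_of_asn_path):
--     temp = sorted((next(iter(d.values())) for d in list_of_asn_path),
--                   key=len, reverse=True)
--     result = {}
--     prefixes = {}  # per key: set of every prefix (as tuple) of the accepted paths
--     for route in temp:
--         k = route[0]
--         if k not in prefixes:
--             result[k] = [route]
--             prefixes[k] = {tuple(route[:i]) for i in range(len(route) + 1)}
--         elif tuple(route) not in prefixes[k]:
--             result[k].append(route)
--             prefixes[k].update(tuple(route[:i]) for i in range(len(route) + 1))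
--     return result
-- ===== Notes on version B (the rewrite author's own statement) =====
-- stated objective: alternative
-- what changed: A rescans the whole accepted group with add_path's prefix comparisons for every route; B instead keeps, per group, a hash set of every prefix of the accepted paths and decides each route by a single set lookup, trading add_path's linear scan of the group for extra prefix bookkeeping.
import Mathlib
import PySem

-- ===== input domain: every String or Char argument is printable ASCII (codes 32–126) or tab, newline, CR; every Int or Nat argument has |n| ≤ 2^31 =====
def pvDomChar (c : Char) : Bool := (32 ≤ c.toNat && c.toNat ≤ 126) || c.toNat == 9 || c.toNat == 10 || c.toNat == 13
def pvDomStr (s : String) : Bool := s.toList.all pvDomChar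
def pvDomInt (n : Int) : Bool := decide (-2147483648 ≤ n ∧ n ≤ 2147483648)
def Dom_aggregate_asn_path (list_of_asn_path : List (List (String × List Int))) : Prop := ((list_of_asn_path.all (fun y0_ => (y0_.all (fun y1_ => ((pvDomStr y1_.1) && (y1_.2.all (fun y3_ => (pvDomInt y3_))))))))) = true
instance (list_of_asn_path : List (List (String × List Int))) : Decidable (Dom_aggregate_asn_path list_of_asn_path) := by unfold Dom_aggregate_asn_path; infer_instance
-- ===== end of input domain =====

-- B replaces A's per-route linear scan of the already-accepted group (add_path) by a per-group
-- hash set holding every prefix of every accepted path, so each route is tested by one set lookup.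

-- ===== PORT A =====
-- path[list(path.keys())[0]]
def pvFirstValA (path : List (String × List Int)) : List Int :=
  let d := PySem.Dict.ofList path
  d.getD (PySem.List.pyGetD d.keys 0 "") []

-- the early-return scan inside add_path: True = some saved path has given as a prefix (return hit)
def pvAddPathScan (given : List Int) : List (List Int) → Bool
  | [] => false
  | path :: rest =>
    if given.length ≤ path.length then
      if given = PySem.List.slice path none (some (given.length : Int)) then true
      else pvAddPathScan given rest
    else pvAddPathScan given rest

-- add_path mutates data_dict in place; the port returns the updated list
def pvAddPath (given : List Int) (data_dict : List (List Int)) : List (List Int) :=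
  if pvAddPathScan given data_dict then data_dict else data_dict ++ [given]

-- body of A's result loop
def pvStepA (r : PySem.Dict Int (List (List Int))) (route : List Int) : PySem.Dict Int (List (List Int)) :=
  if r.contains (PySem.List.pyGetD route 0 0) = false then
    r.insert (PySem.List.pyGetD route 0 0) [route]
  else
    r.insert (PySem.List.pyGetD route 0 0) (pvAddPath route (r.getD (PySem.List.pyGetD route 0 0) []))

def aggregate_asn_path (list_of_asn_path : List (List (String × List Int))) : List (Int × List (List Int)) :=
  let temp := list_of_asn_path.foldl (fun acc path => acc ++ [pvFirstValA path]) []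
  let temp2 := PySem.List.sorted temp (fun x => PySem.List.len x) true
  (temp2.foldl pvStepA PySem.Dict.empty).items

-- ===== PORT B =====
-- next(iter(d.values()))
def pvFirstValB (path : List (String × List Int)) : List Int :=
  ((PySem.Dict.ofList path).values).headD []

-- {tuple(route[:i]) for i in range(len(route) + 1)}
def pvPrefixList (route : List Int) : List (List Int) :=
  (List.range (route.length + 1)).map (fun i => route.take i)

-- body of B's loop over (result, prefixes)
def pvStepB (st : PySem.Dict Int (List (List Int)) × PySem.Dict Int (PySem.Set (List Int)))
    (route : List Int) :
    PySem.Dict Int (List (List Int)) × PySem.Dict Int (PySem.Set (List Int)) :=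
  let k := PySem.List.pyGetD route 0 0
  if st.2.contains k = false then
    (st.1.insert k [route], st.2.insert k (PySem.Set.ofList (pvPrefixList route)))
  else if PySem.Set.contains (st.2.getD k []) route then st
  else (st.1.insert k (st.1.getD k [] ++ [route]),
        st.2.insert k (PySem.Set.update (st.2.getD k []) (pvPrefixList route)))

def aggregate_asn_path_alt (list_of_asn_path : List (List (String × List Int))) : List (Int × List (List Int)) :=
  let temp := PySem.List.sorted (list_of_asn_path.map pvFirstValB) (fun x => PySem.List.len x) true
  (temp.foldl pvStepB (PySem.Dict.empty, PySem.Dict.empty)).1.items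

-- ===== PRECONDITION & SPEC =====
-- Pre_ excludes exactly the inputs on which A raises IndexError: an empty dict in the list
-- (list(path.keys())[0]) or a first value that is an empty list (route[0]).
def Pre_aggregate_asn_path (list_of_asn_path : List (List (String × List Int))) : Prop :=
  ∀ path ∈ list_of_asn_path, path ≠ [] ∧ (PySem.Dict.ofList path).values.headD [] ≠ []
instance (list_of_asn_path : List (List (String × List Int))) : Decidable (Pre_aggregate_asn_path list_of_asn_path) := by unfold Pre_aggregate_asn_path; infer_instance

def pvWitness_aggregate_asn_path : (List (List (String × List Int))) :=
  [[("a", [1, 2, 3])], [("b", [1, 2]), ("c", [7])], [("d", [2, 5])]]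

def Spec_aggregate_asn_path (list_of_asn_path : List (List (String × List Int))) (out : List (Int × List (List Int))) : Prop := out = aggregate_asn_path_alt list_of_asn_path
instance (list_of_asn_path : List (List (String × List Int))) (out : List (Int × List (List Int))) : Decidable (Spec_aggregate_asn_path list_of_asn_path out) := by unfold Spec_aggregate_asn_path; infer_instance

-- ===== CLAIM (what is proved, stated in full; the proofs are below) =====
def Claim_equal_aggregate_asn_path : Prop := ∀ (list_of_asn_path : List (List (String × List Int))), Dom_aggregate_asn_path list_of_asn_path → Pre_aggregate_asn_path list_of_asn_path → Spec_aggregate_asn_path list_of_asn_path (aggregate_asn_path list_of_asn_path)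

-- ===== LEMMAS AND PROOFS =====

-- both ports extract the value of the first key of each dict
theorem firstVal_eq (path : List (String × List Int)) : pvFirstValA path = pvFirstValB path := by
  unfold pvFirstValA pvFirstValB
  rcases h : PySem.Dict.ofList path with ⟨items⟩
  cases items with
  | nil =>
    simp only [PySem.Dict.keys_mk, List.map_nil, PySem.List.pyGetD_zero, List.getD,
      PySem.Dict.getD_eq_get?_getD, PySem.Dict.get?, PySem.Dict.values]
    simp [List.find?]
  | cons p rest =>
    rcases p with ⟨k, v⟩
    simp only [PySem.Dict.keys_mk, List.map_cons, PySem.List.pyGetD_zero_cons,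
      PySem.Dict.getD_eq_get?_getD, PySem.Dict.get?_mk_cons, PySem.Dict.values]
    simp

-- A's add_path scan fires exactly when the route is a prefix of some saved path
theorem scan_iff (given : List Int) (dd : List (List Int)) :
    pvAddPathScan given dd = true ↔ ∃ p ∈ dd, given <+: p := by
  induction dd with
  | nil => simp [pvAddPathScan]
  | cons path rest ih =>
    unfold pvAddPathScan
    by_cases hlen : given.length ≤ path.length
    · simp only [hlen, if_true]
      rw [PySem.List.slice_to_natCast]
      by_cases heq : given = path.take given.length
      · rw [if_pos heq]
        constructor
        · intro _; exact ⟨path, List.mem_cons_self, List.prefix_iff_eq_take.mpr heq⟩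
        · intro _; rfl
      · simp only [if_neg heq, ih, List.mem_cons]
        constructor
        · rintro ⟨p, hp, hpre⟩; exact ⟨p, Or.inr hp, hpre⟩
        · rintro ⟨p, hp | hp, hpre⟩
          · exact absurd (List.prefix_iff_eq_take.mp (hp ▸ hpre)) heq
          · exact ⟨p, hp, hpre⟩
    · simp only [hlen, if_false, ih, List.mem_cons]
      constructor
      · rintro ⟨p, hp, hpre⟩; exact ⟨p, Or.inr hp, hpre⟩
      · rintro ⟨p, hp | hp, hpre⟩
        · exact absurd (hp ▸ hpre).length_le hlen
        · exact ⟨p, hp, hpre⟩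

theorem mem_prefixList (route q : List Int) : q ∈ pvPrefixList route ↔ q <+: route := by
  unfold pvPrefixList
  simp only [List.mem_map, List.mem_range]
  constructor
  · rintro ⟨i, _, rfl⟩; exact List.take_prefix i route
  · intro h
    exact ⟨q.length, Nat.lt_succ_of_le (h.length_le), (List.prefix_iff_eq_take.mp h).symm⟩

theorem mem_setUpdate {s : PySem.Set (List Int)} {xs : List (List Int)} (q : List Int) :
    q ∈ PySem.Set.update s xs ↔ q ∈ s ∨ q ∈ xs := by
  induction xs generalizing s with
  | nil => simp [PySem.Set.update]
  | cons x rest ih =>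
    show q ∈ PySem.Set.update (s.add x) rest ↔ _
    rw [ih, PySem.Set.mem_add]
    simp [List.mem_cons, or_assoc]

-- re-inserting the stored value leaves the dict unchanged
theorem insert_getD_self (d : PySem.Dict Int (List (List Int))) (k : Int)
    (hnd : d.keys.Nodup) (hc : d.contains k = true) :
    d.insert k (d.getD k []) = d := by
  apply PySem.Dict.ext
  rw [PySem.Dict.items_insert_of_contains d _ hc]
  conv_rhs => rw [← List.map_id d.items]
  apply List.map_congr_left
  rintro ⟨k', v⟩ hmem
  by_cases hk : k' = k
  · subst hk
    simp [PySem.Dict.getD_of_mem_items d hmem hnd]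
  · simp [hk]

-- the loop invariant tying B's prefix dictionary to A's result dictionary
def pvInv (r : PySem.Dict Int (List (List Int))) (pfx : PySem.Dict Int (PySem.Set (List Int))) : Prop :=
  pfx.keys = r.keys ∧ r.keys.Nodup ∧
  ∀ k q, (q ∈ pfx.getD k [] ↔ ∃ p ∈ r.getD k [], q <+: p)

theorem step_eq (r : PySem.Dict Int (List (List Int))) (pfx : PySem.Dict Int (PySem.Set (List Int)))
    (route : List Int) (h : pvInv r pfx) :
    pvStepA r route = (pvStepB (r, pfx) route).1 ∧ pvInv (pvStepB (r, pfx) route).1 (pvStepB (r, pfx) route).2 := by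
  obtain ⟨hkeys, hnd, hmem⟩ := h
  have hcont : pfx.contains (PySem.List.pyGetD route 0 0) = r.contains (PySem.List.pyGetD route 0 0) := by
    rw [PySem.Dict.contains_eq_decide_mem_keys, PySem.Dict.contains_eq_decide_mem_keys, hkeys]
  unfold pvStepA pvStepB
  dsimp only
  rw [hcont]
  set k := PySem.List.pyGetD route 0 0 with hk
  by_cases hc : r.contains k = false
  · rw [if_pos hc, if_pos hc]
    dsimp only
    refine ⟨rfl, ?_, PySem.Dict.nodup_keys_insert _ _ _ hnd, ?_⟩
    · rw [PySem.Dict.keys_insert_of_not_contains _ _ (hcont.trans hc),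
        PySem.Dict.keys_insert_of_not_contains _ _ hc, hkeys]
    · intro k' q
      rw [PySem.Dict.getD_insert, PySem.Dict.getD_insert]
      by_cases hk' : k' = k
      · rw [if_pos hk', if_pos hk']
        rw [show (q ∈ PySem.Set.ofList (pvPrefixList route)) ↔ q ∈ pvPrefixList route from
          PySem.Set.mem_ofList _ _, mem_prefixList]
        simp
      · rw [if_neg hk', if_neg hk']
        exact hmem k' q
  · rw [if_neg hc, if_neg hc]
    have hct : r.contains k = true := by revert hc; cases r.contains k <;> simp
    by_cases hin : PySem.Set.contains (pfx.getD k []) route = true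
    · rw [if_pos hin]
      have hmemr : route ∈ pfx.getD k [] := by
        have := hin; rwa [PySem.Set.contains, List.contains_iff_mem] at this
      have hscan : pvAddPathScan route (r.getD k []) = true :=
        (scan_iff _ _).mpr ((hmem k route).mp hmemr)
      unfold pvAddPath
      rw [hscan, if_pos rfl, insert_getD_self r k hnd hct]
      exact ⟨rfl, hkeys, hnd, hmem⟩
    · rw [if_neg hin]
      dsimp only
      have hscan : pvAddPathScan route (r.getD k []) = false := by
        rw [Bool.eq_false_iff, Ne, scan_iff]
        intro hex
        exact hin (by rw [PySem.Set.contains, List.contains_iff_mem]; exact (hmem k route).mpr hex)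
      unfold pvAddPath
      rw [hscan]
      refine ⟨by simp, ?_, PySem.Dict.nodup_keys_insert _ _ _ hnd, ?_⟩
      · rw [PySem.Dict.keys_insert_of_contains _ _ (hcont.trans hct),
          PySem.Dict.keys_insert_of_contains _ _ hct, hkeys]
      · intro k' q
        rw [PySem.Dict.getD_insert, PySem.Dict.getD_insert]
        by_cases hk' : k' = k
        · rw [if_pos hk', if_pos hk']
          rw [mem_setUpdate, mem_prefixList, hmem k q]
          simp only [List.mem_append, List.mem_singleton]
          constructor
          · rintro (⟨p, hp, hpre⟩ | hpre)
            · exact ⟨p, Or.inl hp, hpre⟩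
            · exact ⟨route, Or.inr rfl, hpre⟩
          · rintro ⟨p, hp | rfl, hpre⟩
            · exact Or.inl ⟨p, hp, hpre⟩
            · exact Or.inr hpre
        · rw [if_neg hk', if_neg hk']
          exact hmem k' q

theorem fold_eq (temp : List (List Int)) (r : PySem.Dict Int (List (List Int)))
    (pfx : PySem.Dict Int (PySem.Set (List Int))) (h : pvInv r pfx) :
    temp.foldl pvStepA r = (temp.foldl pvStepB (r, pfx)).1 := by
  induction temp generalizing r pfx with
  | nil => rfl
  | cons route rest ih =>
    obtain ⟨heq, hinv⟩ := step_eq r pfx route h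
    simp only [List.foldl_cons, heq]
    exact ih _ _ hinv

-- ===== VERDICT (by name: the statement is the Claim_ definition above) =====
theorem aggregate_asn_path_spec : Claim_equal_aggregate_asn_path := by
  intro l _ _
  show aggregate_asn_path l = aggregate_asn_path_alt l
  unfold aggregate_asn_path aggregate_asn_path_alt
  dsimp only
  rw [PySem.List.foldl_append_singleton_eq_map, List.nil_append,
    List.map_congr_left (fun p _ => firstVal_eq p)]
  rw [fold_eq _ PySem.Dict.empty PySem.Dict.empty
    ⟨rfl, by rw [PySem.Dict.keys_empty]; exact List.nodup_nil,
     by intro k q; simp [PySem.Dict.getD_empty]⟩]
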